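-- pv_equiv track=rewrite | github.com/hal-da/AOC2023_python | day07/day07.py | get_card_value_puzzle_b
-- ===== SOURCE A (Python) =====
-- def get_card_value_puzzle_b(cards: str) -> int:
--     cards = sorted(cards.replace("J", ""))
--     if not bool(cards):
--         cards = "11111"
--     value = 1
--     acc = 1
--     my_cards = {}
--     for card in cards:
--         if card in my_cards:
--             my_cards[card] += 1
--         else:
--             my_cards[card] = 1
--     most_common_card = next(iter(dict(sorted(my_cards.items(), key=lambda item: item[1], reverse=True))))
--     amount_of_missing_cards = 5 - len(cards)
--     if amount_of_missing_cards > 0: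
--         cards += [most_common_card] * amount_of_missing_cards
--         cards = sorted(cards)
--
--     for i in range(0, len(cards) - 1):
--         if cards[i + 1] == cards[i]:
--             acc *= 2
--             value += value * acc
--         else:
--             acc = 1
--     return value
-- ===== SOURCE B (Python) =====
-- def get_card_value_puzzle_b(cards: str) -> int:
--     s = cards.replace("J", "")
--     if not s:
--         groups = [5]
--     else:
--         groups = [s.count(c) for c in sorted(set(s))]
--         missing = 5 - len(s)
--         if missing > 0:
--             groups[groups.index(max(groups))] += missing
--     value = 1
--     for g in groups:
--         p = 2
--         for _ in range(g - 1):
--             value *= 1 + p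
--             p *= 2
--     return value
-- ===== Notes on version B (the rewrite author's own statement) =====
-- stated objective: simpler
-- what changed: B replaces A's dict-building loop, stable re-sort of the dict items, appending+re-sorting the hand and the adjacent-pair scan with a direct frequency table (count per distinct non-joker card, jokers added to a maximal count) and a closed per-group multiplier product (1+2)(1+4)...(1+2^(c-1)).
import Mathlib
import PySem

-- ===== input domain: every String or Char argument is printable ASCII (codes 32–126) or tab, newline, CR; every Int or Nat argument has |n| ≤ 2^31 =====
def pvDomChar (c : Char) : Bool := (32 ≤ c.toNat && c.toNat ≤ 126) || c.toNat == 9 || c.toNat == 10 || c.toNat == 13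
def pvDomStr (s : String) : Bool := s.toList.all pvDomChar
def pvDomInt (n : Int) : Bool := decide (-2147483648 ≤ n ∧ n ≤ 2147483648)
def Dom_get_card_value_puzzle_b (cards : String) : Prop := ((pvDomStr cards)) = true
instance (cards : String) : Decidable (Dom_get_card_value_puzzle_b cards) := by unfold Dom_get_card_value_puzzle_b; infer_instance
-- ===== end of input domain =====

-- B replaces A's dict loop + stable item re-sort + append-and-re-sort + adjacent-pair scan by a
-- direct frequency table (jokers added to one maximal count) and a closed per-group multiplier
-- product; objective: simpler (same cost on 5-card hands).

-- ===== PORT A =====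
def get_card_value_puzzle_b (cards : String) : Int :=
  let cards1 : List Char := PySem.List.sorted ((PySem.Str.replace cards "J" "").toList) (fun c => c)
  let cards2 : List Char := if cards1 = [] then "11111".toList else cards1
  let my_cards : PySem.Dict Char Int :=
    cards2.foldl (fun d card =>
      if d.contains card then d.insert card (d.getD card 0 + 1)
      else d.insert card 1) PySem.Dict.empty
  -- next(iter(dict(sorted(...)))) : first key of the stable sort by count, descending;
  -- my_cards is never empty here, so the 'J' default of head? is never used
  let most_common_card : Char :=
    (((PySem.List.sorted my_cards.items (fun item => item.2) true).head?).map Prod.fst).getD 'J'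
  let amount_of_missing_cards : Int := 5 - (cards2.length : Int)
  let cards3 : List Char :=
    if amount_of_missing_cards > 0 then
      PySem.List.sorted (cards2 ++ List.replicate amount_of_missing_cards.toNat most_common_card) (fun c => c)
    else cards2
  ((PySem.List.pyRange 0 ((cards3.length : Int) - 1) 1).foldl
      (fun (st : Int × Int) i =>
        if PySem.List.pyGetD cards3 (i + 1) 'J' = PySem.List.pyGetD cards3 i 'J' then
          (st.1 + st.1 * (st.2 * 2), st.2 * 2)
        else (st.1, 1)) (1, 1)).1

-- ===== PORT B =====
def get_card_value_puzzle_b_alt (cards : String) : Int :=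
  let s : List Char := (PySem.Str.replace cards "J" "").toList
  let groups : List Int :=
    if s = [] then [5]
    else
      let gs : List Int :=
        (PySem.List.sorted (PySem.Set.ofList s) (fun c => c)).map (fun c => (s.count c : Int))
      let missing : Int := 5 - (s.length : Int)
      if missing > 0 then
        -- groups[groups.index(max(groups))] += missing; gs is nonempty here, so the
        -- .getD defaults of max?/index? are never used
        let m : Int := (PySem.List.max? gs (fun g => g)).getD 0
        PySem.List.pySetD gs (((PySem.List.index? gs m).getD 0 : Nat) : Int) (m + missing)
      else gs
  groups.foldl (fun value g =>
    ((PySem.List.pyRange 0 (g - 1) 1).foldl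
      (fun (st : Int × Int) _ => (st.1 * (1 + st.2), st.2 * 2)) (value, 2)).1) 1

-- ===== PRECONDITION & SPEC =====
def Spec_get_card_value_puzzle_b (cards : String) (out : Int) : Prop := out = get_card_value_puzzle_b_alt cards
instance (cards : String) (out : Int) : Decidable (Spec_get_card_value_puzzle_b cards out) := by unfold Spec_get_card_value_puzzle_b; infer_instance

-- ===== CLAIM (what is proved, stated in full; the proofs are below) =====
def Claim_equal_get_card_value_puzzle_b : Prop := ∀ (cards : String), Dom_get_card_value_puzzle_b cards → Spec_get_card_value_puzzle_b cards (get_card_value_puzzle_b cards)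


-- ===== LEMMAS AND PROOFS =====

-- ∏_{j=0}^{m-1} (1 + p·2^j)
def prodP : Nat → Int → Int
  | 0, _ => 1
  | m + 1, p => prodP m p * (1 + p * 2 ^ m)

-- score of one run of length r : ∏_{k=1}^{r-1} (1 + 2^k)
def runF (r : Nat) : Int := prodP (r - 1) 2

-- A's adjacent-pair loop as a structural recursion: state (value, acc), prev = previous card
def scanP : Char → Int × Int → List Char → Int × Int
  | _, st, [] => st
  | prev, st, c :: rest =>
    if c = prev then scanP c (st.1 + st.1 * (st.2 * 2), st.2 * 2) rest
    else scanP c (st.1, 1) rest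

def scanVal : List Char → Int
  | [] => 1
  | c :: rest => (scanP c (1, 1) rest).1

theorem prodP_shift (k : Nat) (p : Int) : prodP (k + 1) p = (1 + p) * prodP k (2 * p) := by
  induction k generalizing p with
  | zero => simp [prodP]
  | succ k ih =>
    have h2 : prodP (k + 1 + 1) p = prodP (k + 1) p * (1 + p * 2 ^ (k + 1)) := rfl
    rw [h2, ih, prodP]
    ring

theorem pyRange_nonpos {a e : Int} (h : e ≤ a) : PySem.List.pyRange a e 1 = [] := by
  rw [List.eq_nil_iff_forall_not_mem]
  intro x hx
  rw [PySem.List.mem_pyRange_one] at hx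
  omega

theorem innerB_nat (m : Nat) (v p : Int) :
    (PySem.List.pyRange 0 (m : Int) 1).foldl
      (fun (st : Int × Int) _ => (st.1 * (1 + st.2), st.2 * 2)) (v, p)
      = (v * prodP m p, p * 2 ^ m) := by
  induction m generalizing v p with
  | zero =>
    rw [show ((0 : Nat) : Int) = 0 by norm_num, pyRange_nonpos le_rfl]
    simp [prodP]
  | succ m ih =>
    rw [show ((m + 1 : Nat) : Int) = (m : Int) + 1 by push_cast; ring,
      PySem.List.pyRange_one_succ_right (by positivity), List.foldl_append, ih]
    simp only [List.foldl_cons, List.foldl_nil, prodP, Prod.mk.injEq]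
    constructor <;> ring

theorem innerB_int (e : Int) (v p : Int) :
    (PySem.List.pyRange 0 e 1).foldl
      (fun (st : Int × Int) _ => (st.1 * (1 + st.2), st.2 * 2)) (v, p)
      = (v * prodP e.toNat p, p * 2 ^ e.toNat) := by
  by_cases he : e ≤ 0
  · rw [pyRange_nonpos he]
    simp [Int.toNat_of_nonpos he, prodP]
  · rw [show e = ((e.toNat : Nat) : Int) from (Int.toNat_of_nonneg (by omega)).symm]
    exact innerB_nat e.toNat v p

theorem foldl_mul_map (f : Int → Int) (gs : List Int) : ∀ (v : Int),
    gs.foldl (fun a g => a * f g) v = v * (gs.map f).prod := by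
  induction gs with
  | nil => intro v; simp
  | cons g gs ih => intro v; simp only [List.foldl_cons, List.map_cons, List.prod_cons, ih]; ring

theorem foldB (gs : List Int) (v : Int) :
    gs.foldl (fun value g =>
      ((PySem.List.pyRange 0 (g - 1) 1).foldl
        (fun (st : Int × Int) _ => (st.1 * (1 + st.2), st.2 * 2)) (value, 2)).1) v
      = v * (gs.map (fun g => prodP (g - 1).toNat 2)).prod := by
  have hcongr : (fun (value : Int) (g : Int) =>
      ((PySem.List.pyRange 0 (g - 1) 1).foldl
        (fun (st : Int × Int) _ => (st.1 * (1 + st.2), st.2 * 2)) (value, 2)).1)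
      = fun (value : Int) (g : Int) => value * prodP (g - 1).toNat 2 := by
    funext value g
    rw [innerB_int]
  rw [hcongr, foldl_mul_map]

theorem scanP_scale (l : List Char) : ∀ (prev : Char) (v a C : Int),
    (scanP prev (C * v, a) l).1 = C * (scanP prev (v, a) l).1 := by
  induction l with
  | nil => intro prev v a C; simp [scanP]
  | cons c rest ih =>
    intro prev v a C
    by_cases h : c = prev <;> simp only [scanP, h, if_true, if_false]
    · have h2 : C * v + C * v * (a * 2) = C * (v + v * (a * 2)) := by ring
      rw [h2, ih]
    · exact ih c v 1 C

theorem scanP_replicate (k : Nat) : ∀ (prev : Char) (v a : Int) (rest : List Char),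
    scanP prev (v, a) (List.replicate k prev ++ rest)
      = scanP prev (v * prodP k (a * 2), a * 2 ^ k) rest := by
  induction k with
  | zero => intro prev v a rest; simp [prodP]
  | succ k ih =>
    intro prev v a rest
    rw [List.replicate_succ, List.cons_append]
    simp only [scanP, if_true]
    rw [ih]
    congr 1
    simp only [Prod.mk.injEq]
    constructor
    · rw [prodP_shift, show (2 : Int) * (a * 2) = a * 2 * 2 from by ring]; ring
    · ring

theorem sorted_cons_decomp (rest : List Char) : ∀ (c : Char),
    (c :: rest).Pairwise (· ≤ ·) →
    ∃ k rest', rest = List.replicate k c ++ rest' ∧ c ∉ rest' ∧ rest'.Pairwise (· ≤ ·) := by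
  induction rest with
  | nil => exact fun c _ => ⟨0, [], by simp, by simp, List.Pairwise.nil⟩
  | cons x t ih =>
    intro c h
    rw [List.pairwise_cons] at h
    obtain ⟨hle, hxt⟩ := h
    by_cases hxc : x = c
    · subst hxc
      obtain ⟨k, r', ht, hnot, hp⟩ := ih x hxt
      exact ⟨k + 1, r', by rw [List.replicate_succ, List.cons_append, ht], hnot, hp⟩
    · refine ⟨0, x :: t, by simp, ?_, hxt⟩
      intro hc
      rcases List.mem_cons.mp hc with h1 | h2
      · exact hxc h1.symm
      · have hx_le_c : x ≤ c := (List.pairwise_cons.mp hxt).1 c h2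
        have hc_le_x : c ≤ x := hle x (by simp)
        exact hxc (le_antisymm hx_le_c hc_le_x)

theorem scan_sorted (n : Nat) : ∀ (l : List Char), l.length ≤ n → l.Pairwise (· ≤ ·) →
    scanVal l = ∏ x ∈ l.toFinset, runF (l.count x) := by
  induction n with
  | zero =>
    intro l hlen _
    have h0 : l = [] := List.length_eq_zero_iff.mp (by omega)
    subst h0
    simp [scanVal]
  | succ n ih =>
    intro l hlen hpair
    match l, hpair with
    | [], _ => simp [scanVal]
    | c :: rest, hpair =>
      obtain ⟨k, r', hre, hnot, hp'⟩ := sorted_cons_decomp rest c hpair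
      subst hre
      have hsv : scanVal (c :: (List.replicate k c ++ r'))
          = (scanP c (prodP k 2, 2 ^ k) r').1 := by
        show (scanP c (1, 1) (List.replicate k c ++ r')).1 = _
        rw [scanP_replicate]
        norm_num
      match r', hp', hnot with
      | [], _, _ =>
        rw [hsv]
        have hfin : (c :: (List.replicate k c ++ [])).toFinset = {c} := by
          ext x
          simp [List.mem_replicate]
        rw [hfin, Finset.prod_singleton]
        have hcount : (c :: (List.replicate k c ++ [])).count c = k + 1 := by
          simp
        rw [hcount]
        simp [scanP, runF]
      | c' :: r'', hp', hnot =>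
        have hc' : c' ≠ c := fun h => hnot (h ▸ List.mem_cons_self)
        rw [hsv]
        simp only [scanP, if_neg hc']
        have hscale : (scanP c' (prodP k 2, 1) r'').1
            = prodP k 2 * (scanP c' (1, 1) r'').1 := by
          have := scanP_scale r'' c' 1 1 (prodP k 2)
          simpa using this
        have hIH := ih (c' :: r'') (by simp at hlen ⊢; omega) hp'
        have hfin : (c :: (List.replicate k c ++ c' :: r'')).toFinset
            = insert c (c' :: r'').toFinset := by
          ext x
          simp [List.mem_replicate]
          tauto
        have hcnot : c ∉ (c' :: r'').toFinset := by
          simpa using hnot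
        rw [hscale, hfin, Finset.prod_insert hcnot]
        have hcountc : (c :: (List.replicate k c ++ c' :: r'')).count c = k + 1 := by
          have : (c' :: r'').count c = 0 := List.count_eq_zero.mpr hnot
          simp [this]
        have hprod : ∏ x ∈ (c' :: r'').toFinset,
            runF ((c :: (List.replicate k c ++ c' :: r'')).count x)
            = ∏ x ∈ (c' :: r'').toFinset, runF ((c' :: r'').count x) := by
          apply Finset.prod_congr rfl
          intro x hx
          have hxne : x ≠ c := fun h => hcnot (h ▸ hx)
          congr 1
          rw [List.count_cons_of_ne hxne.symm]
          rw [List.count_append, List.count_replicate]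
          simp [Ne.symm hxne]
        rw [hprod, hcountc, ← hIH]
        show prodP k 2 * scanVal (c' :: r'') = runF (k + 1) * scanVal (c' :: r'')
        congr 1

theorem bridgeA (xs : List Char) : ∀ (rest pre : List Char) (prev : Char) (st : Int × Int),
    xs = pre ++ prev :: rest →
    (PySem.List.pyRange (pre.length : Int) ((xs.length : Int) - 1) 1).foldl
      (fun (st : Int × Int) i =>
        if PySem.List.pyGetD xs (i + 1) 'J' = PySem.List.pyGetD xs i 'J' then
          (st.1 + st.1 * (st.2 * 2), st.2 * 2)
        else (st.1, 1)) st
      = scanP prev st rest := by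
  intro rest
  induction rest with
  | nil =>
    intro pre prev st hxs
    have hlen : xs.length = pre.length + 1 := by rw [hxs]; simp
    rw [hlen]
    rw [pyRange_nonpos (by push_cast; omega)]
    simp [scanP]
  | cons c rest' ih =>
    intro pre prev st hxs
    have hlen : xs.length = pre.length + rest'.length + 2 := by rw [hxs]; simp; omega
    have hcons : PySem.List.pyRange (pre.length : Int) ((xs.length : Int) - 1) 1
        = (pre.length : Int) :: PySem.List.pyRange ((pre.length : Int) + 1) ((xs.length : Int) - 1) 1 := by
      apply PySem.List.pyRange_one_cons
      rw [hlen]; push_cast; omega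
    rw [hcons, List.foldl_cons]
    have hget0 : PySem.List.pyGetD xs ((pre.length : Int)) 'J' = prev := by
      rw [PySem.List.pyGetD_natCast, hxs,
        List.getD_eq_getElem _ _ (by simp),
        List.getElem_append_right le_rfl]
      simp
    have hget1 : PySem.List.pyGetD xs ((pre.length : Int) + 1) 'J' = c := by
      rw [show ((pre.length : Int) + 1) = ((pre.length + 1 : Nat) : Int) by push_cast; ring]
      rw [PySem.List.pyGetD_natCast, hxs,
        List.getD_eq_getElem _ _ (by simp),
        List.getElem_append_right (by simp)]
      simp
    rw [hget0, hget1]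
    have hxs' : xs = (pre ++ [prev]) ++ c :: rest' := by rw [hxs]; simp
    have hlen' : ((pre ++ [prev]).length : Int) = (pre.length : Int) + 1 := by simp
    by_cases hcp : c = prev
    · rw [if_pos hcp]
      have h2 := ih (pre ++ [prev]) c (st.1 + st.1 * (st.2 * 2), st.2 * 2) hxs'
      rw [hlen'] at h2
      rw [h2]
      conv_rhs => rw [scanP]
      rw [if_pos hcp]
    · rw [if_neg hcp]
      have h2 := ih (pre ++ [prev]) c (st.1, 1) hxs'
      rw [hlen'] at h2
      rw [h2]
      conv_rhs => rw [scanP]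
      rw [if_neg hcp]

theorem scanA (c : Char) (rest : List Char) :
    ((PySem.List.pyRange 0 (((c :: rest).length : Int) - 1) 1).foldl
      (fun (st : Int × Int) i =>
        if PySem.List.pyGetD (c :: rest) (i + 1) 'J' = PySem.List.pyGetD (c :: rest) i 'J' then
          (st.1 + st.1 * (st.2 * 2), st.2 * 2)
        else (st.1, 1)) (1, 1)).1 = scanVal (c :: rest) := by
  have h := bridgeA (c :: rest) rest [] c (1, 1) rfl
  simp only [List.length_nil, Nat.cast_zero] at h
  rw [h]
  rfl

theorem prod_bump_eq (S : Finset Char) (f : Char → Nat) (t : Nat) (a b : Char)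
    (ha : a ∈ S) (hb : b ∈ S) (hf : f a = f b) :
    ∏ x ∈ S, runF (f x + if x = a then t else 0)
      = ∏ x ∈ S, runF (f x + if x = b then t else 0) := by
  by_cases hab : a = b
  · subst hab; rfl
  · have hbe : b ∈ S.erase a := Finset.mem_erase.mpr ⟨fun h => hab h.symm, hb⟩
    have hae : a ∈ S.erase b := Finset.mem_erase.mpr ⟨hab, ha⟩
    rw [← Finset.mul_prod_erase S _ ha, ← Finset.mul_prod_erase (S.erase a) _ hbe]
    rw [← Finset.mul_prod_erase S
      (fun x => runF (f x + if x = b then t else 0)) hb,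
      ← Finset.mul_prod_erase (S.erase b)
      (fun x => runF (f x + if x = b then t else 0)) hae]
    rw [Finset.erase_right_comm]
    have hrest : ∏ x ∈ (S.erase b).erase a, runF (f x + if x = a then t else 0)
        = ∏ x ∈ (S.erase b).erase a, runF (f x + if x = b then t else 0) := by
      apply Finset.prod_congr rfl
      intro x hx
      rw [Finset.mem_erase, Finset.mem_erase] at hx
      rw [if_neg hx.1, if_neg hx.2.1]
    rw [hrest]
    have hba : ¬ b = a := fun h => hab h.symm
    simp only [if_neg hab, if_neg hba]
    rw [hf]


-- Both port bodies depend on cards only through the list of non-'J' characters; these are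
-- verbatim copies of the two port bodies over that list (definitional: see body_A/body_B below)
def Abody (s : List Char) : Int :=
  let cards1 : List Char := PySem.List.sorted s (fun c => c)
  let cards2 : List Char := if cards1 = [] then "11111".toList else cards1
  let my_cards : PySem.Dict Char Int :=
    cards2.foldl (fun d card =>
      if d.contains card then d.insert card (d.getD card 0 + 1)
      else d.insert card 1) PySem.Dict.empty
  let most_common_card : Char :=
    (((PySem.List.sorted my_cards.items (fun item => item.2) true).head?).map Prod.fst).getD 'J'
  let amount_of_missing_cards : Int := 5 - (cards2.length : Int)
  let cards3 : List Char :=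
    if amount_of_missing_cards > 0 then
      PySem.List.sorted (cards2 ++ List.replicate amount_of_missing_cards.toNat most_common_card) (fun c => c)
    else cards2
  ((PySem.List.pyRange 0 ((cards3.length : Int) - 1) 1).foldl
      (fun (st : Int × Int) i =>
        if PySem.List.pyGetD cards3 (i + 1) 'J' = PySem.List.pyGetD cards3 i 'J' then
          (st.1 + st.1 * (st.2 * 2), st.2 * 2)
        else (st.1, 1)) (1, 1)).1

def Bbody (s : List Char) : Int :=
  let groups : List Int :=
    if s = [] then [5]
    else
      let gs : List Int :=
        (PySem.List.sorted (PySem.Set.ofList s) (fun c => c)).map (fun c => (s.count c : Int))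
      let missing : Int := 5 - (s.length : Int)
      if missing > 0 then
        let m : Int := (PySem.List.max? gs (fun g => g)).getD 0
        PySem.List.pySetD gs (((PySem.List.index? gs m).getD 0 : Nat) : Int) (m + missing)
      else gs
  groups.foldl (fun value g =>
    ((PySem.List.pyRange 0 (g - 1) 1).foldl
      (fun (st : Int × Int) _ => (st.1 * (1 + st.2), st.2 * 2)) (value, 2)).1) 1

theorem body_A (cards : String) :
    get_card_value_puzzle_b cards = Abody ((PySem.Str.replace cards "J" "").toList) := rfl

theorem body_B (cards : String) :
    get_card_value_puzzle_b_alt cards = Bbody ((PySem.Str.replace cards "J" "").toList) := rfl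

-- A's scan of a sorted nonempty hand is the product of per-run scores
theorem scanned (l : List Char) (hne : l ≠ []) (hp : l.Pairwise (· ≤ ·)) :
    ((PySem.List.pyRange 0 ((l.length : Int) - 1) 1).foldl
      (fun (st : Int × Int) i =>
        if PySem.List.pyGetD l (i + 1) 'J' = PySem.List.pyGetD l i 'J' then
          (st.1 + st.1 * (st.2 * 2), st.2 * 2)
        else (st.1, 1)) (1, 1)).1
    = ∏ x ∈ l.toFinset, runF (l.count x) := by
  match l, hne with
  | c :: rest, _ =>
    rw [scanA]
    exact scan_sorted (c :: rest).length (c :: rest) le_rfl hp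

theorem Aside (s : List Char) (hs : s ≠ []) :
    ∃ mc, mc ∈ s ∧ (∀ x ∈ s, s.count x ≤ s.count mc) ∧
      Abody s = ∏ x ∈ s.toFinset, runF (s.count x + if x = mc then 5 - s.length else 0) := by
  have hl1_perm : (PySem.List.sorted s (fun c => c)).Perm s := PySem.List.sorted_perm _ _ _
  set l1 := PySem.List.sorted s (fun c => c) with hl1
  have hl1_ne : l1 ≠ [] := by
    rw [hl1, Ne, PySem.List.sorted_eq_nil_iff]
    exact hs
  have hlen : l1.length = s.length := hl1_perm.length_eq
  have hcnt : ∀ x, l1.count x = s.count x := fun x => hl1_perm.count_eq x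
  have hmem : ∀ x, x ∈ l1 ↔ x ∈ s := fun x => hl1_perm.mem_iff
  have hpair1 : l1.Pairwise (· ≤ ·) := PySem.List.sorted_pairwise s (fun c => c)
  have hfun : (fun (d : PySem.Dict Char Int) card =>
        if d.contains card then d.insert card (d.getD card 0 + 1) else d.insert card 1)
      = fun d x => d.insert x (d.getD x 0 + 1) := by
    funext d x
    by_cases hc : d.contains x
    · rw [if_pos hc]
    · rw [if_neg hc, PySem.Dict.getD_of_not_contains d 0 (by simpa using hc)]
      norm_num
  have hdict : l1.foldl (fun d card =>
        if d.contains card then d.insert card (d.getD card 0 + 1) else d.insert card 1)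
        PySem.Dict.empty = PySem.Dict.counter l1 := by
    rw [hfun]
    exact PySem.Dict.foldl_insert_getD_add_one_eq_counter l1
  cases hsi : PySem.List.sorted ((PySem.Dict.counter l1).items) (fun item => item.2) true with
  | nil =>
    exfalso
    rw [PySem.List.sorted_eq_nil_iff, PySem.Dict.items_counter, List.map_eq_nil_iff] at hsi
    obtain ⟨y, hy⟩ := List.exists_mem_of_ne_nil l1 hl1_ne
    rw [List.eq_nil_iff_forall_not_mem] at hsi
    exact hsi y ((PySem.Set.mem_ofList l1 y).mpr hy)
  | cons hd tl =>
    have hmax_items : ∀ y ∈ (PySem.Dict.counter l1).items, y.2 ≤ hd.2 :=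
      PySem.List.key_head_sorted_rev_ge _ _ hsi
    have hd_mem : hd ∈ (PySem.Dict.counter l1).items := by
      rw [← PySem.List.mem_sorted _ (fun item => item.2) true, hsi]
      exact List.mem_cons_self
    rw [PySem.Dict.items_counter] at hd_mem
    obtain ⟨mc0, hmc0_in, hhd⟩ := List.mem_map.mp hd_mem
    subst hhd
    have hmc0_s : mc0 ∈ s := (hmem mc0).mp ((PySem.Set.mem_ofList l1 mc0).mp hmc0_in)
    have hmax : ∀ x ∈ s, s.count x ≤ s.count mc0 := by
      intro x hx
      have hyi : (x, (l1.count x : Int)) ∈ (PySem.Dict.counter l1).items := by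
        rw [PySem.Dict.items_counter]
        exact List.mem_map_of_mem ((PySem.Set.mem_ofList l1 x).mpr ((hmem x).mpr hx))
      have := hmax_items _ hyi
      simp only at this
      rw [hcnt, hcnt] at this
      exact_mod_cast this
    refine ⟨mc0, hmc0_s, hmax, ?_⟩
    by_cases hm : (5 : Int) - (s.length : Int) > 0
    · have hm' : (5 : Int) - (l1.length : Int) > 0 := by rw [hlen]; exact hm
      set l3 := PySem.List.sorted
          (l1 ++ List.replicate ((5 : Int) - (l1.length : Int)).toNat mc0) (fun c => c) with hl3
      have hl3_perm : l3.Perm (l1 ++ List.replicate ((5 : Int) - (l1.length : Int)).toNat mc0) :=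
        PySem.List.sorted_perm _ _ _
      have hl3_pair : l3.Pairwise (· ≤ ·) := PySem.List.sorted_pairwise _ _
      have hl3_ne : l3 ≠ [] := by
        rw [hl3, Ne, PySem.List.sorted_eq_nil_iff, List.append_eq_nil_iff]
        rintro ⟨h1, -⟩
        exact hl1_ne h1
      have hA : Abody s = ∏ x ∈ l3.toFinset, runF (l3.count x) := by
        simp only [Abody]
        rw [← hl1, if_neg hl1_ne, hdict, hsi]
        simp only [List.head?_cons, Option.map_some, Option.getD_some]
        rw [if_pos hm', ← hl3]
        exact scanned l3 hl3_ne hl3_pair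
      have hfin3 : l3.toFinset = s.toFinset := by
        ext x
        rw [List.mem_toFinset, List.mem_toFinset, hl3_perm.mem_iff, List.mem_append,
          List.mem_replicate]
        constructor
        · rintro (h | ⟨-, h⟩)
          · exact (hmem x).mp h
          · exact h ▸ hmc0_s
        · intro hx
          exact Or.inl ((hmem x).mpr hx)
      have hcnt3 : ∀ x, l3.count x = s.count x + if x = mc0 then 5 - s.length else 0 := by
        intro x
        rw [hl3_perm.count_eq, List.count_append, hcnt, List.count_replicate]
        by_cases hx : x = mc0
        · rw [if_pos hx, if_pos (by rw [hx]; exact beq_self_eq_true mc0)]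
          have : l1.length = s.length := hlen
          omega
        · rw [if_neg hx, if_neg (fun h => hx (beq_iff_eq.mp h).symm)]
      rw [hA, hfin3]
      exact Finset.prod_congr rfl (fun x _ => by rw [hcnt3])
    · have hm' : ¬ (5 : Int) - (l1.length : Int) > 0 := by rw [hlen]; exact hm
      have ht0 : 5 - s.length = 0 := by omega
      have hA : Abody s = ∏ x ∈ l1.toFinset, runF (l1.count x) := by
        simp only [Abody]
        rw [← hl1, if_neg hl1_ne, if_neg hm']
        exact scanned l1 hl1_ne hpair1
      have hfin1 : l1.toFinset = s.toFinset := by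
        ext x
        rw [List.mem_toFinset, List.mem_toFinset, hmem]
      rw [hA, hfin1]
      exact Finset.prod_congr rfl (fun x _ => by rw [hcnt, ht0, ite_self, Nat.add_zero])

theorem Bside (s : List Char) (hs : s ≠ []) :
    ∃ b, b ∈ s ∧ (∀ x ∈ s, s.count x ≤ s.count b) ∧
      Bbody s = ∏ x ∈ s.toFinset, runF (s.count x + if x = b then 5 - s.length else 0) := by
  have hss_perm : (PySem.List.sorted (PySem.Set.ofList s) (fun c => c)).Perm (PySem.Set.ofList s) :=
    PySem.List.sorted_perm _ _ _
  set ss := PySem.List.sorted (PySem.Set.ofList s) (fun c => c) with hss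
  have hmem_ss : ∀ x, x ∈ ss ↔ x ∈ s := by
    intro x
    rw [hss, PySem.List.mem_sorted, PySem.Set.mem_ofList]
  have hnodup : ss.Nodup := hss_perm.nodup_iff.mpr (PySem.Set.nodup_ofList s)
  have hfin : ss.toFinset = s.toFinset := by
    ext x
    rw [List.mem_toFinset, List.mem_toFinset, hmem_ss]
  have hcnt_pos : ∀ x ∈ ss, 1 ≤ s.count x := fun x hx =>
    List.count_pos_iff.mpr ((hmem_ss x).mp hx)
  set gs := ss.map (fun c => ((s.count c : Int))) with hgs
  have hss_ne : ss ≠ [] := by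
    intro h
    rw [hss, PySem.List.sorted_eq_nil_iff] at h
    obtain ⟨y, hy⟩ := List.exists_mem_of_ne_nil s hs
    rw [List.eq_nil_iff_forall_not_mem] at h
    exact h y ((PySem.Set.mem_ofList s y).mpr hy)
  by_cases hm : (5 : Int) - (s.length : Int) > 0
  · cases hmax : PySem.List.max? gs (fun g => g) with
    | none =>
      exfalso
      have := (PySem.List.max?_eq_none_iff gs (fun g => g)).mp hmax
      rw [hgs, List.map_eq_nil_iff] at this
      exact hss_ne this
    | some m =>
      have hm_max : ∀ g ∈ gs, g ≤ m := PySem.List.max?_isMax hmax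
      have hm_mem : m ∈ gs := PySem.List.max?_mem hmax
      cases hidx : PySem.List.index? gs m with
      | none =>
        exact absurd hm_mem ((PySem.List.index?_eq_none_iff gs m).mp hidx)
      | some i =>
        obtain ⟨hi, hgsi, -⟩ := PySem.List.getElem_of_index?_eq_some hidx
        have hi' : i < ss.length := by simpa [hgs] using hi
        have hmb : m = (s.count (ss[i]'hi') : Int) := by
          rw [← hgsi]
          simp only [hgs, List.getElem_map]
        refine ⟨ss[i], (hmem_ss _).mp (List.getElem_mem hi'), ?_, ?_⟩
        · intro x hx
          have hle : ((s.count x : Int)) ≤ m :=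
            hm_max _ (by rw [hgs]; exact List.mem_map_of_mem ((hmem_ss x).mpr hx))
          rw [hmb] at hle
          exact_mod_cast hle
        · have hlist : gs.set i (m + (5 - (s.length : Int)))
              = ss.map (fun c => (s.count c : Int) + if c = ss[i] then 5 - (s.length : Int) else 0) := by
            apply List.ext_getElem
            · simp [hgs]
            · intro j h1 h2
              simp only [List.getElem_set, List.getElem_map]
              by_cases hji : i = j
              · subst hji
                rw [if_pos rfl, if_pos rfl, hmb]
              · have hj : j < ss.length := by simpa using h2
                have hne2 : ¬ ss[j]'hj = ss[i]'hi' := by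
                  rw [hnodup.getElem_inj_iff]
                  omega
                rw [if_neg hji, if_neg hne2, add_zero]
                simp only [hgs, List.getElem_map]
          have hB : Bbody s
              = ((gs.set i (m + (5 - (s.length : Int)))).map (fun g => prodP (g - 1).toNat 2)).prod := by
            simp only [Bbody]
            rw [← hss, ← hgs, if_neg hs, if_pos hm, hmax, Option.getD_some, hidx,
              Option.getD_some, PySem.List.pySetD_natCast, foldB, one_mul]
          rw [hB, hlist, List.map_map]
          have hmap : ss.map ((fun g => prodP (g - 1).toNat 2)
                ∘ (fun c => (s.count c : Int) + if c = ss[i] then 5 - (s.length : Int) else 0))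
              = ss.map (fun c => runF (s.count c + if c = ss[i] then 5 - s.length else 0)) := by
            apply List.map_congr_left
            intro c hc
            have h1 : 1 ≤ s.count c := hcnt_pos c hc
            simp only [Function.comp_apply, runF]
            congr 1
            by_cases hcb : c = ss[i]
            · rw [if_pos hcb, if_pos hcb]
              omega
            · rw [if_neg hcb, if_neg hcb]
              omega
          rw [hmap, ← List.prod_toFinset _ hnodup, hfin]
  · cases hmax : PySem.List.max? gs (fun g => g) with
    | none =>
      exfalso
      have := (PySem.List.max?_eq_none_iff gs (fun g => g)).mp hmax
      rw [hgs, List.map_eq_nil_iff] at this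
      exact hss_ne this
    | some m =>
      have hm_max : ∀ g ∈ gs, g ≤ m := PySem.List.max?_isMax hmax
      have hm_mem : m ∈ gs := PySem.List.max?_mem hmax
      rw [hgs] at hm_mem
      obtain ⟨b0, hb0_mem, hb0_eq⟩ := List.mem_map.mp hm_mem
      refine ⟨b0, (hmem_ss b0).mp hb0_mem, ?_, ?_⟩
      · intro x hx
        have hle := hm_max _ (by rw [hgs]; exact List.mem_map_of_mem ((hmem_ss x).mpr hx))
        rw [← hb0_eq] at hle
        exact_mod_cast hle
      · have ht0 : 5 - s.length = 0 := by omega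
        have hB : Bbody s = (gs.map (fun g => prodP (g - 1).toNat 2)).prod := by
          simp only [Bbody]
          rw [← hss, ← hgs, if_neg hs, if_neg hm, foldB, one_mul]
        rw [hB, hgs, List.map_map]
        have hmap : ss.map ((fun g => prodP (g - 1).toNat 2) ∘ (fun c => ((s.count c : Int))))
            = ss.map (fun c => runF (s.count c + if c = b0 then 5 - s.length else 0)) := by
          apply List.map_congr_left
          intro c hc
          have h1 : 1 ≤ s.count c := hcnt_pos c hc
          simp only [Function.comp_apply, runF, ht0, ite_self, Nat.add_zero]
          congr 1
          omega
        rw [hmap, ← List.prod_toFinset _ hnodup, hfin]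

theorem body_eq (s : List Char) : Abody s = Bbody s := by
  by_cases hs : s = []
  · subst hs; decide
  · obtain ⟨mc, hmc_mem, hmc_max, hA⟩ := Aside s hs
    obtain ⟨b, hb_mem, hb_max, hB⟩ := Bside s hs
    rw [hA, hB]
    exact prod_bump_eq s.toFinset (fun x => s.count x) (5 - s.length) mc b
      (List.mem_toFinset.mpr hmc_mem) (List.mem_toFinset.mpr hb_mem)
      (le_antisymm (hb_max mc hmc_mem) (hmc_max b hb_mem))

-- ===== VERDICT (by name: the statement is the Claim_ definition above) =====
theorem get_card_value_puzzle_b_spec : Claim_equal_get_card_value_puzzle_b := by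
  intro cards _
  unfold Spec_get_card_value_puzzle_b
  rw [body_A, body_B, body_eq]
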